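-- pv_equiv track=rewrite | github.com/WayScience/NF1_organoid_cell_segmentation | datasets/dataset_00/utils/GenericSliceSelector.py | _has_centered_symmetric_overlap
-- ===== SOURCE A (Python) =====
-- def _has_centered_symmetric_overlap(
--     target_slice: list[int], input_slice: list[int]
-- ) -> bool:
--
--     def is_symmetric(slices: list[int]) -> bool:
--         if len(slices) % 2 == 0:
--             return False
--         mid = len(slices) // 2
--         center = slices[mid]
--         left = slices[:mid]
--         right = slices[mid + 1 :]
--         expected_left = [center - i for i in range(1, mid + 1)][::-1]
--         expected_right = [center + i for i in range(1, mid + 1)]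
--         return left == expected_left and right == expected_right
--
--     return (
--         is_symmetric(target_slice)
--         and is_symmetric(input_slice)
--         and target_slice[len(target_slice) // 2]
--         == input_slice[len(input_slice) // 2]
--         and len(target_slice) <= len(input_slice)
--     )
-- ===== SOURCE B (Python) =====
-- def _has_centered_symmetric_overlap(
--     target_slice: list[int], input_slice: list[int]
-- ) -> bool:
--     # A centered-symmetric list is an odd-length run of consecutive integers.
--     # Check the input once with a difference scan; then target must be the
--     # centered sub-slice of input (which forces target symmetric, equal
--     # centers and len(target) <= len(input)).
--     n = len(input_slice)
--     if n % 2 == 0: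
--         return False
--     for j in range(n - 1):
--         if input_slice[j + 1] - input_slice[j] != 1:
--             return False
--     d = n - len(target_slice)
--     if d < 0 or d % 2 == 1:
--         return False
--     return target_slice == input_slice[d // 2 : n - d // 2]
-- ===== Notes on version B (the rewrite author's own statement) =====
-- stated objective: alternative
-- what changed: B never checks target's symmetry directly: it verifies input is an odd-length consecutive run with a single pairwise-difference scan (no allocation of expected half-lists), then checks target is exactly the centered sub-slice input[d//2 : n-d//2], which subsumes A's separate target-symmetry, center-equality and length checks.
import Mathlib
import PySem

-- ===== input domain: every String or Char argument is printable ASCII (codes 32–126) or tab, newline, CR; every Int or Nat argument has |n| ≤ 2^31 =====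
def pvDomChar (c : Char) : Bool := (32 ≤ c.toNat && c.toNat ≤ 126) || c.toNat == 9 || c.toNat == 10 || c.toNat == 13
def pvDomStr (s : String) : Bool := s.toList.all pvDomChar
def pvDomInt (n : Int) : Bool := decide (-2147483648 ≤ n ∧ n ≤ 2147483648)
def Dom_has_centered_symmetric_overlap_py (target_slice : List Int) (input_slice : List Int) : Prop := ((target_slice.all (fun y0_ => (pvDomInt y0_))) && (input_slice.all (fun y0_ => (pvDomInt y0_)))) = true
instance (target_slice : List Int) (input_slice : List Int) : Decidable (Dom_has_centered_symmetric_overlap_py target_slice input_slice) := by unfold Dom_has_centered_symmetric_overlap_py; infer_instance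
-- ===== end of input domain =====

-- B drops A's per-list symmetry construction: it difference-scans the input once and then
-- checks the target is exactly the centered sub-slice of the input (objective: alternative).

-- ===== PORT A =====
-- inner helper is_symmetric of A.  slices[mid] is only reached with mid < len (odd length),
-- so the .getD 0 default is never the returned value; [::-1] is ported as .reverse (exact).
def pvIsSymA (slices : List Int) : Bool :=
  if slices.length % 2 == 0 then false
  else
    let mid : Nat := slices.length / 2
    let center : Int := (PySem.List.pyGet? slices (mid : Int)).getD 0
    let left := PySem.List.slice slices none (some (mid : Int))
    let right := PySem.List.slice slices (some ((mid : Int) + 1)) none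
    let expected_left := ((PySem.List.pyRange 1 ((mid : Int) + 1) 1).map (fun i => center - i)).reverse
    let expected_right := (PySem.List.pyRange 1 ((mid : Int) + 1) 1).map (fun i => center + i)
    left == expected_left && right == expected_right

-- target_slice[len//2] is only evaluated after both symmetry checks succeed (nonempty lists),
-- so the .getD 0 default never decides the result (&& short-circuits to false before it).
def has_centered_symmetric_overlap_py (target_slice : List Int) (input_slice : List Int) : Bool :=
  pvIsSymA target_slice && pvIsSymA input_slice &&
    ((PySem.List.pyGet? target_slice ((target_slice.length / 2 : Nat) : Int)).getD 0
      == (PySem.List.pyGet? input_slice ((input_slice.length / 2 : Nat) : Int)).getD 0) &&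
    decide (target_slice.length ≤ input_slice.length)

-- ===== PORT B =====
-- B's for-loop over range(n-1) with an early `return False` is ported as `.all` over
-- List.range (n-1); input_slice[j], [j+1] are in range there, so .getD 0 never decides.
def has_centered_symmetric_overlap_py_alt (target_slice : List Int) (input_slice : List Int) : Bool :=
  let n := input_slice.length
  if n % 2 == 0 then false
  else if !((List.range (n - 1)).all (fun j =>
      (PySem.List.pyGet? input_slice ((j : Int) + 1)).getD 0
        - (PySem.List.pyGet? input_slice ((j : Int))).getD 0 == 1)) then false
  else
    let d : Int := (n : Int) - (target_slice.length : Int)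
    if d < 0 || PySem.Int.mod d 2 == 1 then false
    else target_slice == PySem.List.slice input_slice
        (some (PySem.Int.floordiv d 2)) (some ((n : Int) - PySem.Int.floordiv d 2))

-- ===== PRECONDITION & SPEC =====
def Spec_has_centered_symmetric_overlap_py (target_slice : List Int) (input_slice : List Int) (out : Bool) : Prop := out = has_centered_symmetric_overlap_py_alt target_slice input_slice
instance (target_slice : List Int) (input_slice : List Int) (out : Bool) : Decidable (Spec_has_centered_symmetric_overlap_py target_slice input_slice out) := by unfold Spec_has_centered_symmetric_overlap_py; infer_instance

-- ===== CLAIM (what is proved, stated in full; the proofs are below) =====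
def Claim_equal_has_centered_symmetric_overlap_py : Prop := ∀ (target_slice : List Int) (input_slice : List Int), Dom_has_centered_symmetric_overlap_py target_slice input_slice → Spec_has_centered_symmetric_overlap_py target_slice input_slice (has_centered_symmetric_overlap_py target_slice input_slice)

-- ===== LEMMAS AND PROOFS =====

-- the consecutive run of length L starting at a
def pvRun (a : Int) (L : Nat) : List Int := (List.range L).map (fun k : Nat => a + (k : Int))

lemma pvRun_length (a : Int) (L : Nat) : (pvRun a L).length = L := by simp [pvRun]

lemma pvRun_getD (a : Int) (L k : Nat) (h : k < L) : (pvRun a L).getD k 0 = a + k := by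
  unfold pvRun
  rw [List.getD_eq_getElem _ 0 (by simpa using h)]
  simp

lemma pvRun_headD (a : Int) (L : Nat) (h : 0 < L) : (pvRun a L).headD 0 = a := by
  have := pvRun_getD a L 0 h
  cases hL : pvRun a L with
  | nil => simp [hL] at this ⊢; have := pvRun_length a L; simp [hL] at this; omega
  | cons x t => simp [hL] at this ⊢; simpa using this

lemma pvRun_drop (a : Int) (L j : Nat) : (pvRun a L).drop j = pvRun (a + j) (L - j) := by
  apply List.ext_getElem
  · simp [pvRun]
  · intro k h1 h2
    simp only [pvRun, List.getElem_drop, List.getElem_map, List.getElem_range]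
    push_cast; ring

lemma pvRun_take (a : Int) (L m : Nat) : (pvRun a L).take m = pvRun a (min m L) := by
  apply List.ext_getElem
  · simp [pvRun]
  · intro k h1 h2
    simp [pvRun]

-- A's expected_left ++ center :: expected_right is the consecutive run of length 2m+1 centered at c.
lemma pvRunSplit (c : Int) (m : Nat) :
    (List.range (2*m+1)).map (fun k : Nat => c - (m:Int) + (k:Int))
    = ((List.range m).map (fun k : Nat => c - ((1:Int)+(k:Int)))).reverse
        ++ c :: (List.range m).map (fun k : Nat => c + ((1:Int)+(k:Int))) := by
  apply List.ext_getElem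
  · simp; omega
  · intro i h1 h2
    simp only [List.getElem_map, List.getElem_range, List.getElem_append, List.length_reverse,
      List.length_map, List.length_range, List.getElem_reverse, List.getElem_cons]
    split_ifs with hi h0
    · omega
    · omega
    · omega

-- characterisation of A's is_symmetric on odd length
lemma pvArith_char (s : List Int) (m : Nat) (h : s.length = 2 * m + 1) :
    pvIsSymA s = true ↔ s = pvRun (s.getD m 0 - (m : Int)) (2 * m + 1) := by
  have hm : s.length / 2 = m := by omega
  have hmod : ¬ (s.length % 2 == 0) = true := by simp; omega
  have hlt : m < s.length := by omega
  unfold pvIsSymA pvRun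
  rw [if_neg hmod]
  simp only [hm]
  rw [PySem.List.pyGet?_natCast, ← List.getD_eq_getElem?_getD,
      PySem.List.slice_to_natCast,
      show ((m:Int)+1) = (((m+1 : Nat)):Int) by push_cast; ring,
      PySem.List.slice_from_natCast,
      PySem.List.pyRange_one,
      show (((m+1 : Nat):Int) - 1).toNat = m by omega,
      pvRunSplit (s.getD m 0) m]
  simp only [List.map_map, Function.comp_def, Bool.and_eq_true, beq_iff_eq]
  have hdec : s.take m ++ s.getD m 0 :: s.drop (m+1) = s := by
    rw [List.getD_eq_getElem s 0 hlt, ← List.drop_eq_getElem_cons hlt, List.take_append_drop]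
  constructor
  · rintro ⟨hL, hR⟩
    conv_lhs => rw [← hdec]
    rw [hL, hR]
  · intro hs
    have hkey : s.take m ++ s.getD m 0 :: s.drop (m+1)
        = ((List.range m).map (fun k : Nat => s.getD m 0 - ((1:Int)+(k:Int)))).reverse
            ++ s.getD m 0 :: (List.range m).map (fun k : Nat => s.getD m 0 + ((1:Int)+(k:Int))) := by
      rw [hdec]; exact hs
    obtain ⟨hL, hR⟩ := List.append_inj hkey (by simp; omega)
    exact ⟨hL, (List.cons_eq_cons.mp hR).2⟩

-- B's difference scan over the input
def pvScan (i : List Int) : Bool :=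
  (List.range (i.length - 1)).all (fun j =>
    (PySem.List.pyGet? i ((j : Int) + 1)).getD 0 - (PySem.List.pyGet? i ((j : Int))).getD 0 == 1)

lemma pvScan_iff (i : List Int) (h0 : 0 < i.length) :
    pvScan i = true ↔ i = pvRun (i.headD 0) i.length := by
  constructor
  · intro h
    have hstep : ∀ j, j + 1 < i.length → i.getD (j+1) 0 = i.getD j 0 + 1 := by
      intro j hj
      have := (List.all_eq_true.mp h) j (by simp; omega)
      rw [show ((j:Int) + 1) = (((j+1 : Nat)):Int) by push_cast; ring] at this
      rw [PySem.List.pyGet?_natCast, PySem.List.pyGet?_natCast,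
          ← List.getD_eq_getElem?_getD, ← List.getD_eq_getElem?_getD] at this
      have := beq_iff_eq.mp this
      omega
    have hall : ∀ k, k < i.length → i.getD k 0 = i.headD 0 + k := by
      intro k
      induction k with
      | zero =>
        intro _
        cases i with
        | nil => simp at h0
        | cons x t => simp
      | succ k ih =>
        intro hk
        have := hstep k hk
        rw [this, ih (by omega)]
        push_cast; ring
    apply List.ext_getElem
    · simp [pvRun]
    · intro k h1 h2
      have := hall k h1
      rw [List.getD_eq_getElem i 0 h1] at this
      rw [this]
      simp [pvRun]
  · intro hi
    apply List.all_eq_true.mpr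
    intro j hj
    simp only [List.mem_range] at hj
    rw [show ((j:Int) + 1) = (((j+1 : Nat)):Int) by push_cast; ring,
        PySem.List.pyGet?_natCast, PySem.List.pyGet?_natCast,
        ← List.getD_eq_getElem?_getD, ← List.getD_eq_getElem?_getD]
    conv_lhs => rw [hi]
    rw [pvRun_getD _ _ _ (by omega), pvRun_getD _ _ _ (by omega)]
    simp only [beq_iff_eq]
    push_cast; ring

-- the centered sub-slice of a run, as computed by B's slice expression
lemma pvSlice_run (a : Int) (n L : Nat) (hL : L ≤ n) :
    PySem.List.slice (pvRun a n) (some (((n - L)/2 : Nat) : Int))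
        (some ((n : Int) - (((n - L)/2 : Nat) : Int)))
      = pvRun (a + (((n - L)/2 : Nat) : Int)) (n - (n - L)/2 - (n - L)/2) := by
  rw [show ((n : Int) - (((n - L)/2 : Nat) : Int)) = (((n - (n - L)/2 : Nat)) : Int) by
        push_cast [Nat.cast_sub (by omega : (n - L)/2 ≤ n)]; ring,
      PySem.List.slice_natCast, pvRun_drop, pvRun_take]
  congr 1
  omega

-- the two programs agree on every pair of lists
lemma pvMain (t i : List Int) :
    has_centered_symmetric_overlap_py t i = has_centered_symmetric_overlap_py_alt t i := by
  by_cases hpar : i.length % 2 = 0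
  · have hA : pvIsSymA i = false := by
      unfold pvIsSymA; rw [if_pos (by simp [hpar])]
    unfold has_centered_symmetric_overlap_py has_centered_symmetric_overlap_py_alt
    rw [if_pos (by simp [hpar])]
    simp [hA]
  · have hb : i.length = 2 * (i.length / 2) + 1 := by omega
    set b := i.length / 2 with hbdef
    have h0 : 0 < i.length := by omega
    by_cases hscan : pvScan i = true
    · have hi : i = pvRun (i.headD 0) i.length := (pvScan_iff i h0).mp hscan
      set a := i.headD 0 with hadef
      have hcent : i.getD b 0 = a + b := by
        conv_lhs => rw [hi]
        exact pvRun_getD a i.length b (by omega)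
      have hsymI : pvIsSymA i = true := by
        rw [pvArith_char i b hb, hcent]
        rw [show a + (b:Int) - (b:Int) = a by ring, ← hb]
        exact hi
      by_cases hlen : t.length ≤ i.length
      · have hd : (i.length : Int) - (t.length : Int) = ((i.length - t.length : Nat) : Int) := by
          push_cast [Nat.cast_sub hlen]; ring
        by_cases htpar : t.length % 2 = 0
        · -- d is odd: A fails on target symmetry, B on the parity test
          have hAt : pvIsSymA t = false := by
            unfold pvIsSymA; rw [if_pos (by simp [htpar])]
          unfold has_centered_symmetric_overlap_py has_centered_symmetric_overlap_py_alt
          rw [if_neg (by simp [hpar]), if_neg (by simpa [pvScan] using hscan)]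
          rw [hd]
          rw [if_pos (by
            simp only [Bool.or_eq_true, beq_iff_eq]
            right
            rw [PySem.Int.mod_eq_emod_of_pos (by norm_num)]
            have : (i.length - t.length) % 2 = 1 := by omega
            omega)]
          simp [hAt]
        · -- d even: both reduce to "t is the centered run of its length"
          have ht : t.length = 2 * (t.length / 2) + 1 := by omega
          set a' := t.length / 2 with ha'def
          have ha'b : a' ≤ b := by omega
          have hdiv : (i.length - t.length) / 2 = b - a' := by omega
          unfold has_centered_symmetric_overlap_py has_centered_symmetric_overlap_py_alt
          rw [if_neg (by simp [hpar]), if_neg (by simpa [pvScan] using hscan)]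
          rw [hd]
          rw [if_neg (by
            simp only [Bool.or_eq_true, beq_iff_eq, not_or]
            constructor
            · simp
            · rw [PySem.Int.mod_eq_emod_of_pos (by norm_num)]
              have : (i.length - t.length) % 2 = 0 := by omega
              omega)]
          rw [show PySem.Int.floordiv ((i.length - t.length : Nat) : Int) 2
                = (((i.length - t.length)/2 : Nat) : Int) by
              exact_mod_cast PySem.Int.floordiv_natCast (i.length - t.length) 2]
          conv_rhs => rw [hi]
          simp only [pvRun_length]
          rw [pvSlice_run a i.length t.length hlen]
          rw [show i.length - (i.length - t.length)/2 - (i.length - t.length)/2 = t.length by omega]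
          rw [PySem.List.pyGet?_natCast, PySem.List.pyGet?_natCast,
              ← List.getD_eq_getElem?_getD, ← List.getD_eq_getElem?_getD, hcent, ← ha'def]
          have hrunEq : pvRun (a + ((b:Int) - (a':Int))) (2*a'+1)
              = pvRun (a + (((i.length - t.length)/2 : Nat) : Int)) t.length := by
            have h1 : a + ((b:Int) - (a':Int)) = a + (((i.length - t.length)/2 : Nat) : Int) := by
              rw [hdiv]; push_cast [Nat.cast_sub ha'b]; ring
            rw [h1, ht]
          rw [Bool.eq_iff_iff]
          simp only [Bool.and_eq_true, beq_iff_eq, decide_eq_true_eq]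
          constructor
          · rintro ⟨⟨⟨hsymT, _⟩, hc⟩, _⟩
            rw [pvArith_char t a' ht] at hsymT
            conv_lhs => rw [hsymT]
            rw [hc, show a + (b:Int) - (a':Int) = a + ((b:Int) - (a':Int)) by ring]
            exact hrunEq
          · intro hts
            have hget : t.getD a' 0 = a + (b:Int) := by
              conv_lhs => rw [hts]
              rw [pvRun_getD _ _ _ (by omega), hdiv]
              push_cast [Nat.cast_sub ha'b]; ring
            refine ⟨⟨⟨?_, hsymI⟩, hget⟩, hlen⟩
            rw [pvArith_char t a' ht]
            conv_lhs => rw [hts]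
            rw [hget, show a + (b:Int) - (a':Int) = a + ((b:Int) - (a':Int)) by ring]
            exact hrunEq.symm
      · -- len(target) > len(input): A's final check and B's d < 0 test both fail
        unfold has_centered_symmetric_overlap_py has_centered_symmetric_overlap_py_alt
        rw [if_neg (by simp [hpar]), if_neg (by simpa [pvScan] using hscan)]
        rw [if_pos (by
          simp only [Bool.or_eq_true, decide_eq_true_eq]
          left
          have : (i.length : Int) < (t.length : Int) := by exact_mod_cast Nat.lt_of_not_le hlen
          omega)]
        simp [hlen]
    · -- scan fails: input is not a run, so A's input symmetry fails too
      have hAi : pvIsSymA i = false := by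
        by_contra hx
        have hsym : pvIsSymA i = true := by
          cases h : pvIsSymA i
          · exact absurd h hx
          · rfl
        rw [pvArith_char i b hb] at hsym
        have hhead : i.headD 0 = i.getD b 0 - (b:Int) := by
          conv_lhs => rw [hsym]
          exact pvRun_headD _ _ (by omega)
        exact hscan ((pvScan_iff i h0).mpr (by rw [hhead, hb]; exact hsym))
      unfold has_centered_symmetric_overlap_py has_centered_symmetric_overlap_py_alt
      rw [if_neg (by simp [hpar]), if_pos (by simpa [pvScan] using hscan)]
      simp [hAi]

-- ===== VERDICT (by name: the statement is the Claim_ definition above) =====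
theorem has_centered_symmetric_overlap_py_spec : Claim_equal_has_centered_symmetric_overlap_py := by
  intro t i _
  unfold Spec_has_centered_symmetric_overlap_py
  exact pvMain t i
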